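-- pv_equiv track=rewrite | github.com/anjakovacevic/university | sausau/priprema_1klk.py | prviZadatak
-- ===== SOURCE A (Python) =====
-- def prviZadatak(niz):
--     donjaGranica = 0
--     gornjaGranica = len(niz)-1
--     while donjaGranica <= gornjaGranica:
--         sredina = (donjaGranica+gornjaGranica) // 2
--         if niz[sredina] % 2 == 0:
--             return niz[sredina]
--         elif niz[sredina] > (sredina*2-1):
--             donjaGranica = sredina+1
--         else:
--             gornjaGranica = sredina-1
--
--     return -1
-- ===== SOURCE B (Python) =====
-- def prviZadatak(niz):
--     # recursion on shrinking sublists (slices) with an index offset, instead of A's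
--     # iterative two-bound loop over the whole array
--     def trazi(deo, pomak):
--         if not deo:
--             return -1
--         polovina = (len(deo) - 1) // 2
--         kandidat = deo[polovina]
--         indeks = pomak + polovina
--         if kandidat % 2 == 0:
--             return kandidat
--         if kandidat > indeks * 2 - 1:
--             return trazi(deo[polovina + 1:], indeks + 1)
--         return trazi(deo[:polovina], pomak)
--     return trazi(niz, 0)
-- ===== Notes on version B (the rewrite author's own statement) =====
-- stated objective: alternative
-- what changed: A's iterative binary search mutating two index bounds over the whole array is replaced by recursion on shrinking sublists: the helper carries the current slice of the array plus the offset of its first element, picks the slice's middle element, and recurses on the left or right sub-slice.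
import Mathlib
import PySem

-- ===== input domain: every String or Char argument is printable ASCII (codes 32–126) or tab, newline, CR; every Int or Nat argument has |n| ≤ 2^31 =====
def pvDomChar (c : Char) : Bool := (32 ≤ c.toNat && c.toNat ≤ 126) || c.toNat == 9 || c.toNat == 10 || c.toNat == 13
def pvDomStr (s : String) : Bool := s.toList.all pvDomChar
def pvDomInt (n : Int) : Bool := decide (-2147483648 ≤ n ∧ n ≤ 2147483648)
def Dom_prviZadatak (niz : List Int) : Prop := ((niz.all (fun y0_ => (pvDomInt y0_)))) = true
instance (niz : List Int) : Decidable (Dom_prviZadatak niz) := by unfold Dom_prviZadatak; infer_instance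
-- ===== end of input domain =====

-- B re-implements A's iterative two-bound binary search as recursion on shrinking slices of the array carried with an index offset; alternative decomposition, same cost.


-- ===== PORT A =====
-- A's while-loop, ported as structural recursion on the loop state (donjaGranica, gornjaGranica).
-- niz[sredina] is ported via pyGet?; from the top call 0 ≤ donja ≤ sredina ≤ gornja < len(niz), so the
-- none (IndexError) branch is unreachable and carries -1.
def prviZadatakLoop (niz : List Int) (donja gornja : Int) : Int :=
  if h : donja ≤ gornja then
    let sredina := PySem.Int.floordiv (donja + gornja) 2
    match PySem.List.pyGet? niz sredina with
    | none => -1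
    | some v =>
      if PySem.Int.mod v 2 = 0 then v
      else if v > sredina * 2 - 1 then prviZadatakLoop niz (sredina + 1) gornja
      else prviZadatakLoop niz donja (sredina - 1)
  else -1
termination_by (gornja + 1 - donja).toNat
decreasing_by
  · have := PySem.Int.floordiv_two_mid_bounds h; omega
  · have := PySem.Int.floordiv_two_mid_bounds h; omega

def prviZadatak (niz : List Int) : Int :=
  prviZadatakLoop niz 0 ((niz.length : Int) - 1)

-- ===== PORT B =====
-- B's helper `trazi`: recursion on the current sublist `deo` (a slice of the array) plus the offset
-- `pomak` of its first element in the original array; the unreachable IndexError branch carries -1.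
def trazi (deo : List Int) (pomak : Int) : Int :=
  if hne : deo = [] then -1
  else
    let polovina := PySem.Int.floordiv ((deo.length : Int) - 1) 2
    match PySem.List.pyGet? deo polovina with
    | none => -1
    | some kandidat =>
      let indeks := pomak + polovina
      if PySem.Int.mod kandidat 2 = 0 then kandidat
      else if kandidat > indeks * 2 - 1 then
        trazi (PySem.List.slice deo (some (polovina + 1)) none) (indeks + 1)
      else
        trazi (PySem.List.slice deo none (some polovina)) pomak
termination_by deo.length
decreasing_by
  · have hlen : 0 < deo.length := List.length_pos_iff.mpr hne
    have hb := PySem.Int.floordiv_two_mid_bounds (show (0:Int) ≤ (deo.length : Int) - 1 by omega)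
    simp only [zero_add] at hb
    rw [PySem.List.slice_from deo (a := PySem.Int.floordiv ((deo.length : Int) - 1) 2 + 1) (by omega)]
    simp only [List.length_drop]
    omega
  · have hlen : 0 < deo.length := List.length_pos_iff.mpr hne
    have hb := PySem.Int.floordiv_two_mid_bounds (show (0:Int) ≤ (deo.length : Int) - 1 by omega)
    simp only [zero_add] at hb
    rw [PySem.List.slice_to deo (b := PySem.Int.floordiv ((deo.length : Int) - 1) 2) (by omega)]
    simp only [List.length_take]
    omega

def prviZadatak_alt (niz : List Int) : Int := trazi niz 0

-- ===== PRECONDITION & SPEC =====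
def Spec_prviZadatak (niz : List Int) (out : Int) : Prop := out = prviZadatak_alt niz
instance (niz : List Int) (out : Int) : Decidable (Spec_prviZadatak niz out) := by unfold Spec_prviZadatak; infer_instance

-- ===== CLAIM (what is proved, stated in full; the proofs are below) =====
def Claim_equal_prviZadatak : Prop := ∀ (niz : List Int), Dom_prviZadatak niz → Spec_prviZadatak niz (prviZadatak niz)

-- ===== LEMMAS AND PROOFS =====
theorem loopA_eq_trazi (niz : List Int) (donja gornja : Int) :
    0 ≤ donja → -1 ≤ gornja → gornja < (niz.length : Int) →
    prviZadatakLoop niz donja gornja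
      = trazi ((niz.drop donja.toNat).take ((gornja + 1 - donja).toNat)) donja := by
  fun_induction prviZadatakLoop niz donja gornja with
  | case1 d g h s hv =>
    intro h0 _ hg
    have hmid := PySem.Int.floordiv_two_mid_bounds h
    have hs : s = PySem.Int.floordiv (d + g) 2 := rfl
    rw [PySem.List.pyGet?_of_nonneg_of_lt niz (by omega) (by omega)] at hv
    rw [List.getElem?_eq_getElem (by omega)] at hv
    cases hv
  | case2 d g h s v hv hvEven =>
    intro h0 _ hg
    have hmid := PySem.Int.floordiv_two_mid_bounds h
    have hs : s = PySem.Int.floordiv (d + g) 2 := rfl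
    have harith : d + PySem.Int.floordiv (g - d) 2 = PySem.Int.floordiv (d + g) 2 := by
      rw [PySem.Int.floordiv_eq_ediv_of_pos (by norm_num), PySem.Int.floordiv_eq_ediv_of_pos (by norm_num)]
      omega
    have hdlen : ((niz.drop d.toNat).take ((g + 1 - d).toNat)).length = (g + 1 - d).toNat := by
      simp [List.length_take, List.length_drop]; omega
    rw [trazi, dif_neg (by intro hnil; rw [hnil] at hdlen; simp at hdlen; omega)]
    simp only [hdlen]
    have hcast : ((((g + 1 - d).toNat : Nat) : Int) - 1) = g - d := by omega
    rw [hcast]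
    have hple : 0 ≤ PySem.Int.floordiv (g - d) 2 ∧ PySem.Int.floordiv (g - d) 2 ≤ g - d := by
      have := PySem.Int.floordiv_two_mid_bounds (show (0:Int) ≤ g - d by omega)
      simpa using this
    rw [PySem.List.pyGet?_of_nonneg_of_lt _ (by omega) (by rw [hdlen]; omega)]
    rw [PySem.List.pyGet?_of_nonneg_of_lt niz (by omega) (by omega)] at hv
    have hget : ((niz.drop d.toNat).take ((g + 1 - d).toNat))[(PySem.Int.floordiv (g - d) 2).toNat]?
        = niz[(PySem.Int.floordiv (d + g) 2).toNat]? := by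
      rw [List.getElem?_take_of_lt (by omega), List.getElem?_drop]
      congr 1
      omega
    rw [hget, hv]
    dsimp only
    rw [if_pos hvEven]
  | case3 d g h s v hv hvEven hgt ih =>
    intro h0 hg1 hg
    have hmid := PySem.Int.floordiv_two_mid_bounds h
    have hs : s = PySem.Int.floordiv (d + g) 2 := rfl
    have harith : d + PySem.Int.floordiv (g - d) 2 = PySem.Int.floordiv (d + g) 2 := by
      rw [PySem.Int.floordiv_eq_ediv_of_pos (by norm_num), PySem.Int.floordiv_eq_ediv_of_pos (by norm_num)]
      omega
    have hdlen : ((niz.drop d.toNat).take ((g + 1 - d).toNat)).length = (g + 1 - d).toNat := by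
      simp [List.length_take, List.length_drop]; omega
    rw [trazi, dif_neg (by intro hnil; rw [hnil] at hdlen; simp at hdlen; omega)]
    simp only [hdlen]
    have hcast : ((((g + 1 - d).toNat : Nat) : Int) - 1) = g - d := by omega
    rw [hcast]
    have hple : 0 ≤ PySem.Int.floordiv (g - d) 2 ∧ PySem.Int.floordiv (g - d) 2 ≤ g - d := by
      have := PySem.Int.floordiv_two_mid_bounds (show (0:Int) ≤ g - d by omega)
      simpa using this
    rw [PySem.List.pyGet?_of_nonneg_of_lt _ (by omega) (by rw [hdlen]; omega)]
    rw [PySem.List.pyGet?_of_nonneg_of_lt niz (by omega) (by omega)] at hv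
    have hget : ((niz.drop d.toNat).take ((g + 1 - d).toNat))[(PySem.Int.floordiv (g - d) 2).toNat]?
        = niz[(PySem.Int.floordiv (d + g) 2).toNat]? := by
      rw [List.getElem?_take_of_lt (by omega), List.getElem?_drop]
      congr 1
      omega
    rw [hget, hv]
    dsimp only
    rw [if_neg hvEven, if_pos (show v > (d + PySem.Int.floordiv (g - d) 2) * 2 - 1 by omega)]
    rw [ih (by omega) (by omega) (by omega)]
    rw [PySem.List.slice_from _ (a := PySem.Int.floordiv (g - d) 2 + 1) (by omega)]
    rw [List.drop_take, List.drop_drop]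
    congr 1
    · congr 1
      · omega
      · congr 1
        omega
    · omega
  | case4 d g h s v hv hvEven hgt ih =>
    intro h0 hg1 hg
    have hmid := PySem.Int.floordiv_two_mid_bounds h
    have hs : s = PySem.Int.floordiv (d + g) 2 := rfl
    have harith : d + PySem.Int.floordiv (g - d) 2 = PySem.Int.floordiv (d + g) 2 := by
      rw [PySem.Int.floordiv_eq_ediv_of_pos (by norm_num), PySem.Int.floordiv_eq_ediv_of_pos (by norm_num)]
      omega
    have hdlen : ((niz.drop d.toNat).take ((g + 1 - d).toNat)).length = (g + 1 - d).toNat := by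
      simp [List.length_take, List.length_drop]; omega
    rw [trazi, dif_neg (by intro hnil; rw [hnil] at hdlen; simp at hdlen; omega)]
    simp only [hdlen]
    have hcast : ((((g + 1 - d).toNat : Nat) : Int) - 1) = g - d := by omega
    rw [hcast]
    have hple : 0 ≤ PySem.Int.floordiv (g - d) 2 ∧ PySem.Int.floordiv (g - d) 2 ≤ g - d := by
      have := PySem.Int.floordiv_two_mid_bounds (show (0:Int) ≤ g - d by omega)
      simpa using this
    rw [PySem.List.pyGet?_of_nonneg_of_lt _ (by omega) (by rw [hdlen]; omega)]
    rw [PySem.List.pyGet?_of_nonneg_of_lt niz (by omega) (by omega)] at hv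
    have hget : ((niz.drop d.toNat).take ((g + 1 - d).toNat))[(PySem.Int.floordiv (g - d) 2).toNat]?
        = niz[(PySem.Int.floordiv (d + g) 2).toNat]? := by
      rw [List.getElem?_take_of_lt (by omega), List.getElem?_drop]
      congr 1
      omega
    rw [hget, hv]
    dsimp only
    rw [if_neg hvEven, if_neg (show ¬ v > (d + PySem.Int.floordiv (g - d) 2) * 2 - 1 by omega)]
    rw [ih (by omega) (by omega) (by omega)]
    rw [PySem.List.slice_to _ (b := PySem.Int.floordiv (g - d) 2) (by omega)]
    rw [List.take_take]
    congr 2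
    omega
  | case5 d g h =>
    intro h0 _ _
    rw [show (g + 1 - d).toNat = 0 by omega, List.take_zero, trazi, dif_pos rfl]

-- ===== VERDICT (by name: the statement is the Claim_ definition above) =====
theorem prviZadatak_spec : Claim_equal_prviZadatak := by
  intro niz _
  unfold Spec_prviZadatak prviZadatak prviZadatak_alt
  rw [loopA_eq_trazi niz 0 ((niz.length : Int) - 1) (by omega) (by omega) (by omega)]
  simp
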